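-- pv_equiv track=rewrite | github.com/alejandrorusso/mkdocstocanvas | scripts/canvas_processing.py | style_admonitions
-- ===== SOURCE A (Python) =====
-- def style_admonitions(html_content: str) -> str:
--     """Add inline styles for admonitions (Note, Warning, etc.)"""
--     admonition_styles = {
--         'note': 'background-color: #e7f2fa; border-left: 4px solid #2196F3; color: #014361;',
--         'warning': 'background-color: #fff4e5; border-left: 4px solid #ff9800; color: #663c00;',
--         'important': 'background-color: #ffe5e5; border-left: 4px solid #f44336; color: #5f2120;',
--         'tip': 'background-color: #e8f5e9; border-left: 4px solid #4caf50; color: #1b5e20;',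
--         'danger': 'background-color: #ffebee; border-left: 4px solid #f44336; color: #5f2120;',
--         'info': 'background-color: #e1f5fe; border-left: 4px solid #03a9f4; color: #01579b;',
--     }
--
--     for admonition_type, style in admonition_styles.items():
--         # Style the admonition container
--         html_content = html_content.replace(
--             f'<div class="admonition {admonition_type}">',
--             f'<div class="admonition {admonition_type}" style="padding: 15px 20px; margin: 1.5em 0; border-radius: 4px; {style}">'
--         )
--         # Style the title
--         html_content = html_content.replace(
--             f'<p class="admonition-title">',
--             f'<p class="admonition-title" style="font-weight: 600; margin: 0 0 10px 0; font-size: 1.1em;">'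
--         )
--
--     return html_content
-- ===== SOURCE B (Python) =====
-- # B: one left-to-right scan with a first-match rule table (precomputed styled tags),
-- # instead of A's twelve sequential whole-string str.replace passes.
--
-- _RULES = [
--     ('<div class="admonition note">',
--      '<div class="admonition note" style="padding: 15px 20px; margin: 1.5em 0; border-radius: 4px; background-color: #e7f2fa; border-left: 4px solid #2196F3; color: #014361;">'),
--     ('<div class="admonition warning">',
--      '<div class="admonition warning" style="padding: 15px 20px; margin: 1.5em 0; border-radius: 4px; background-color: #fff4e5; border-left: 4px solid #ff9800; color: #663c00;">'),
--     ('<div class="admonition important">',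
--      '<div class="admonition important" style="padding: 15px 20px; margin: 1.5em 0; border-radius: 4px; background-color: #ffe5e5; border-left: 4px solid #f44336; color: #5f2120;">'),
--     ('<div class="admonition tip">',
--      '<div class="admonition tip" style="padding: 15px 20px; margin: 1.5em 0; border-radius: 4px; background-color: #e8f5e9; border-left: 4px solid #4caf50; color: #1b5e20;">'),
--     ('<div class="admonition danger">',
--      '<div class="admonition danger" style="padding: 15px 20px; margin: 1.5em 0; border-radius: 4px; background-color: #ffebee; border-left: 4px solid #f44336; color: #5f2120;">'),
--     ('<div class="admonition info">',
--      '<div class="admonition info" style="padding: 15px 20px; margin: 1.5em 0; border-radius: 4px; background-color: #e1f5fe; border-left: 4px solid #03a9f4; color: #01579b;">'),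
--     ('<p class="admonition-title">',
--      '<p class="admonition-title" style="font-weight: 600; margin: 0 0 10px 0; font-size: 1.1em;">'),
-- ]
--
--
-- def style_admonitions(html_content: str) -> str:
--     """Add inline styles for admonitions (Note, Warning, etc.)"""
--     out = []
--     i = 0
--     n = len(html_content)
--     while i < n:
--         for pat, rep in _RULES:
--             if html_content.startswith(pat, i):
--                 out.append(rep)
--                 i += len(pat)
--                 break
--         else:
--             out.append(html_content[i])
--             i += 1
--     return ''.join(out)
-- ===== Notes on version B (the rewrite author's own statement) =====
-- stated objective: alternative
-- what changed: B makes a single left-to-right scan over the string with a 7-entry first-match rule table (emit the styled replacement at each matching tag position, else copy the character), instead of A's twelve sequential whole-string str.replace passes over the style dict.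
import Mathlib
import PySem

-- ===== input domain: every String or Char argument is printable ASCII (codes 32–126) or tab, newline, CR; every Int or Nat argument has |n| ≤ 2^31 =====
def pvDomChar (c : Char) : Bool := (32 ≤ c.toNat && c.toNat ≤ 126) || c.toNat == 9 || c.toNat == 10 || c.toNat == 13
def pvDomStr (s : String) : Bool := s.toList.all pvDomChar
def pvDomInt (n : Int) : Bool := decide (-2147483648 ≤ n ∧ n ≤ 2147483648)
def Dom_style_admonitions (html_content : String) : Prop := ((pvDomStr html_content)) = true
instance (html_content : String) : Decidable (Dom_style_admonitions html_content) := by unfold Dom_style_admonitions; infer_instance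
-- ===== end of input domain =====

-- B replaces A's twelve sequential whole-string replace passes by ONE left-to-right scan with a
-- first-match rule table (alternative decomposition; identical output).

set_option maxRecDepth 8000

-- ===== PORT A =====
-- the admonition_styles dict, in insertion order
def pvAdmonitionStyles : List (String × String) := [
  ("note", "background-color: #e7f2fa; border-left: 4px solid #2196F3; color: #014361;"),
  ("warning", "background-color: #fff4e5; border-left: 4px solid #ff9800; color: #663c00;"),
  ("important", "background-color: #ffe5e5; border-left: 4px solid #f44336; color: #5f2120;"),
  ("tip", "background-color: #e8f5e9; border-left: 4px solid #4caf50; color: #1b5e20;"),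
  ("danger", "background-color: #ffebee; border-left: 4px solid #f44336; color: #5f2120;"),
  ("info", "background-color: #e1f5fe; border-left: 4px solid #03a9f4; color: #01579b;")]

-- literal transliteration of A: for each dict item, replace the container tag, then the title tag
def style_admonitions (html_content : String) : String :=
  pvAdmonitionStyles.foldl (fun h p =>
    let h1 := PySem.Str.replace h
      ("<div class=\"admonition " ++ p.1 ++ "\">")
      ("<div class=\"admonition " ++ p.1 ++ "\" style=\"padding: 15px 20px; margin: 1.5em 0; border-radius: 4px; " ++ p.2 ++ "\">")
    PySem.Str.replace h1
      "<p class=\"admonition-title\">"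
      "<p class=\"admonition-title\" style=\"font-weight: 600; margin: 0 0 10px 0; font-size: 1.1em;\">")
    html_content

-- ===== PORT B =====
-- Source B's precomputed rule table _RULES (6 container rules + the title rule), as char lists
def pvRules : List (List Char × List Char) := [
  (['<', 'd', 'i', 'v', ' ', 'c', 'l', 'a', 's', 's', '=', '"', 'a', 'd', 'm', 'o', 'n', 'i', 't', 'i', 'o', 'n', ' ', 'n', 'o', 't', 'e', '"', '>'],
   ['<', 'd', 'i', 'v', ' ', 'c', 'l', 'a', 's', 's', '=', '"', 'a', 'd', 'm', 'o', 'n', 'i', 't', 'i', 'o', 'n', ' ', 'n', 'o', 't', 'e', '"', ' ', 's', 't', 'y', 'l', 'e', '=', '"', 'p', 'a', 'd', 'd', 'i', 'n', 'g', ':', ' ', '1', '5', 'p', 'x', ' ', '2', '0', 'p', 'x', ';', ' ', 'm', 'a', 'r', 'g', 'i', 'n', ':', ' ', '1', '.', '5', 'e', 'm', ' ', '0', ';', ' ', 'b', 'o', 'r', 'd', 'e', 'r', '-', 'r', 'a', 'd', 'i', 'u', 's', ':', ' ', '4', 'p', 'x', ';', ' ', 'b', 'a', 'c', 'k', 'g',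 'r', 'o', 'u', 'n', 'd', '-', 'c', 'o', 'l', 'o', 'r', ':', ' ', '#', 'e', '7', 'f', '2', 'f', 'a', ';', ' ', 'b', 'o', 'r', 'd', 'e', 'r', '-', 'l', 'e', 'f', 't', ':', ' ', '4', 'p', 'x', ' ', 's', 'o', 'l', 'i', 'd', ' ', '#', '2', '1', '9', '6', 'F', '3', ';', ' ', 'c', 'o', 'l', 'o', 'r', ':', ' ', '#', '0', '1', '4', '3', '6', '1', ';', '"', '>']),
  (['<', 'd', 'i', 'v', ' ', 'c', 'l', 'a', 's', 's', '=', '"', 'a', 'd', 'm', 'o', 'n', 'i', 't', 'i', 'o', 'n', ' ', 'w', 'a', 'r', 'n', 'i', 'n', 'g', '"', '>'],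
   ['<', 'd', 'i', 'v', ' ', 'c', 'l', 'a', 's', 's', '=', '"', 'a', 'd', 'm', 'o', 'n', 'i', 't', 'i', 'o', 'n', ' ', 'w', 'a', 'r', 'n', 'i', 'n', 'g', '"', ' ', 's', 't', 'y', 'l', 'e', '=', '"', 'p', 'a', 'd', 'd', 'i', 'n', 'g', ':', ' ', '1', '5', 'p', 'x', ' ', '2', '0', 'p', 'x', ';', ' ', 'm', 'a', 'r', 'g', 'i', 'n', ':', ' ', '1', '.', '5', 'e', 'm', ' ', '0', ';', ' ', 'b', 'o', 'r', 'd', 'e', 'r', '-', 'r', 'a', 'd', 'i', 'u', 's', ':', ' ', '4', 'p', 'x', ';', ' ', 'b', 'a', 'c', 'k', 'g', 'r', 'o', 'u', 'n', 'd', '-', 'c', 'o', 'l', 'o', 'r', ':', ' ', '#', 'f', 'f', 'f', '4', 'e', '5', ';', ' ', 'b', 'o', 'r', 'd', 'e', 'r', '-', 'l', 'e', 'f', 't', ':', ' ', '4', 'p', 'x', ' ', 's', 'o', 'l', 'i', 'd', ' ', '#', 'f', 'f', '9', '8', '0', '0', ';', ' ', 'c', 'o', 'l', 'o', 'r', ':',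 ' ', '#', '6', '6', '3', 'c', '0', '0', ';', '"', '>']),
  (['<', 'd', 'i', 'v', ' ', 'c', 'l', 'a', 's', 's', '=', '"', 'a', 'd', 'm', 'o', 'n', 'i', 't', 'i', 'o', 'n', ' ', 'i', 'm', 'p', 'o', 'r', 't', 'a', 'n', 't', '"', '>'],
   ['<', 'd', 'i', 'v', ' ', 'c', 'l', 'a', 's', 's', '=', '"', 'a', 'd', 'm', 'o', 'n', 'i', 't', 'i', 'o', 'n', ' ', 'i', 'm', 'p', 'o', 'r', 't', 'a', 'n', 't', '"', ' ', 's', 't', 'y', 'l', 'e', '=', '"', 'p', 'a', 'd', 'd', 'i', 'n', 'g', ':', ' ', '1', '5', 'p', 'x', ' ', '2', '0', 'p', 'x', ';', ' ', 'm', 'a', 'r', 'g', 'i', 'n', ':', ' ', '1', '.', '5', 'e', 'm', ' ', '0', ';', ' ', 'b', 'o', 'r', 'd', 'e', 'r', '-', 'r', 'a', 'd', 'i', 'u', 's', ':', ' ', '4', 'p', 'x', ';', ' ', 'b', 'a', 'c', 'k', 'g', 'r', 'o', 'u', 'n', 'd', '-', 'c', 'o', 'l', 'o', 'r', ':', ' ',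 '#', 'f', 'f', 'e', '5', 'e', '5', ';', ' ', 'b', 'o', 'r', 'd', 'e', 'r', '-', 'l', 'e', 'f', 't', ':', ' ', '4', 'p', 'x', ' ', 's', 'o', 'l', 'i', 'd', ' ', '#', 'f', '4', '4', '3', '3', '6', ';', ' ', 'c', 'o', 'l', 'o', 'r', ':', ' ', '#', '5', 'f', '2', '1', '2', '0', ';', '"', '>']),
  (['<', 'd', 'i', 'v', ' ', 'c', 'l', 'a', 's', 's', '=', '"', 'a', 'd', 'm', 'o', 'n', 'i', 't', 'i', 'o', 'n', ' ', 't', 'i', 'p', '"', '>'],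
   ['<', 'd', 'i', 'v', ' ', 'c', 'l', 'a', 's', 's', '=', '"', 'a', 'd', 'm', 'o', 'n', 'i', 't', 'i', 'o', 'n', ' ', 't', 'i', 'p', '"', ' ', 's', 't', 'y', 'l', 'e', '=', '"', 'p', 'a', 'd', 'd', 'i', 'n', 'g', ':', ' ', '1', '5', 'p', 'x', ' ', '2', '0', 'p', 'x', ';', ' ', 'm', 'a', 'r', 'g', 'i', 'n', ':', ' ', '1', '.', '5', 'e', 'm', ' ', '0', ';', ' ', 'b', 'o', 'r', 'd', 'e', 'r', '-', 'r', 'a', 'd', 'i', 'u', 's', ':', ' ', '4', 'p', 'x', ';', ' ', 'b', 'a', 'c', 'k', 'g', 'r', 'o', 'u', 'n', 'd', '-', 'c', 'o', 'l', 'o', 'r', ':', ' ', '#', 'e', '8', 'f', '5', 'e', '9', ';', ' ', 'b', 'o', 'r', 'd', 'e', 'r', '-', 'l', 'e', 'f', 't', ':', ' ', '4', 'p', 'x', ' ', 's', 'o', 'l', 'i', 'd', ' ', '#', '4', 'c', 'a', 'f', '5', '0', ';', ' ', 'c', 'o', 'l', 'o', 'r', ':', ' ', '#', '1', 'b', '5',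 'e', '2', '0', ';', '"', '>']),
  (['<', 'd', 'i', 'v', ' ', 'c', 'l', 'a', 's', 's', '=', '"', 'a', 'd', 'm', 'o', 'n', 'i', 't', 'i', 'o', 'n', ' ', 'd', 'a', 'n', 'g', 'e', 'r', '"', '>'],
   ['<', 'd', 'i', 'v', ' ', 'c', 'l', 'a', 's', 's', '=', '"', 'a', 'd', 'm', 'o', 'n', 'i', 't', 'i', 'o', 'n', ' ', 'd', 'a', 'n', 'g', 'e', 'r', '"', ' ', 's', 't', 'y', 'l', 'e', '=', '"', 'p', 'a', 'd', 'd', 'i', 'n', 'g', ':', ' ', '1', '5', 'p', 'x', ' ', '2', '0', 'p', 'x', ';', ' ', 'm', 'a', 'r', 'g', 'i', 'n', ':', ' ', '1', '.', '5', 'e', 'm', ' ', '0', ';', ' ', 'b', 'o', 'r', 'd', 'e', 'r', '-', 'r', 'a', 'd', 'i', 'u', 's', ':', ' ', '4', 'p', 'x', ';', ' ', 'b', 'a', 'c', 'k', 'g', 'r', 'o', 'u', 'n', 'd', '-', 'c', 'o', 'l', 'o', 'r', ':', ' ', '#', 'f', 'f', 'e', 'b', 'e', 'e', ';', ' ', 'b',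 'o', 'r', 'd', 'e', 'r', '-', 'l', 'e', 'f', 't', ':', ' ', '4', 'p', 'x', ' ', 's', 'o', 'l', 'i', 'd', ' ', '#', 'f', '4', '4', '3', '3', '6', ';', ' ', 'c', 'o', 'l', 'o', 'r', ':', ' ', '#', '5', 'f', '2', '1', '2', '0', ';', '"', '>']),
  (['<', 'd', 'i', 'v', ' ', 'c', 'l', 'a', 's', 's', '=', '"', 'a', 'd', 'm', 'o', 'n', 'i', 't', 'i', 'o', 'n', ' ', 'i', 'n', 'f', 'o', '"', '>'],
   ['<', 'd', 'i', 'v', ' ', 'c', 'l', 'a', 's', 's', '=', '"', 'a', 'd', 'm', 'o', 'n', 'i', 't', 'i', 'o', 'n', ' ', 'i', 'n', 'f', 'o', '"', ' ', 's', 't', 'y', 'l', 'e', '=', '"', 'p', 'a', 'd', 'd', 'i', 'n', 'g', ':', ' ', '1', '5', 'p', 'x', ' ', '2', '0', 'p', 'x', ';', ' ', 'm', 'a', 'r', 'g', 'i', 'n', ':', ' ', '1', '.', '5', 'e', 'm', ' ', '0', ';', ' ', 'b', 'o', 'r', 'd', 'e', 'r', '-', 'r', 'a', 'd', 'i', 'u',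 's', ':', ' ', '4', 'p', 'x', ';', ' ', 'b', 'a', 'c', 'k', 'g', 'r', 'o', 'u', 'n', 'd', '-', 'c', 'o', 'l', 'o', 'r', ':', ' ', '#', 'e', '1', 'f', '5', 'f', 'e', ';', ' ', 'b', 'o', 'r', 'd', 'e', 'r', '-', 'l', 'e', 'f', 't', ':', ' ', '4', 'p', 'x', ' ', 's', 'o', 'l', 'i', 'd', ' ', '#', '0', '3', 'a', '9', 'f', '4', ';', ' ', 'c', 'o', 'l', 'o', 'r', ':', ' ', '#', '0', '1', '5', '7', '9', 'b', ';', '"', '>']),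
  (['<', 'p', ' ', 'c', 'l', 'a', 's', 's', '=', '"', 'a', 'd', 'm', 'o', 'n', 'i', 't', 'i', 'o', 'n', '-', 't', 'i', 't', 'l', 'e', '"', '>'],
   ['<', 'p', ' ', 'c', 'l', 'a', 's', 's', '=', '"', 'a', 'd', 'm', 'o', 'n', 'i', 't', 'i', 'o', 'n', '-', 't', 'i', 't', 'l', 'e', '"', ' ', 's', 't', 'y', 'l', 'e', '=', '"', 'f', 'o', 'n', 't', '-', 'w', 'e', 'i', 'g', 'h', 't', ':', ' ', '6', '0', '0', ';', ' ', 'm', 'a', 'r', 'g', 'i', 'n', ':', ' ', '0', ' ', '0', ' ', '1', '0', 'p', 'x', ' ', '0', ';', ' ', 'f', 'o', 'n', 't', '-', 's', 'i', 'z', 'e', ':', ' ', '1', '.', '1', 'e', 'm', ';', '"', '>'])]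

-- the for/else over _RULES: first rule whose pattern starts here, as (pattern length, replacement)
def pvMatch : List (List Char × List Char) → List Char → Option (Nat × List Char)
  | [], _ => none
  | (p, r) :: rs, l => if p.isPrefixOf l then some (p.length, r) else pvMatch rs l

-- Source B's while-loop: emit the matched replacement and skip its pattern, else copy one char.
-- Fuel = remaining length bounds the loop (each iteration consumes at least one character).
def pvScanGo : Nat → List Char → List Char
  | 0, _ => []
  | fuel + 1, l =>
    match pvMatch pvRules l with
    | some (n, r) => r ++ pvScanGo fuel (l.drop n)
    | none =>
      match l with
      | [] => []
      | c :: t => c :: pvScanGo fuel t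

def style_admonitions_alt (html_content : String) : String :=
  String.ofList (pvScanGo html_content.toList.length html_content.toList)

-- ===== PRECONDITION & SPEC =====
def Spec_style_admonitions (html_content : String) (out : String) : Prop := out = style_admonitions_alt html_content
instance (html_content : String) (out : String) : Decidable (Spec_style_admonitions html_content out) := by unfold Spec_style_admonitions; infer_instance

-- ===== CLAIM (what is proved, stated in full; the proofs are below) =====
def Claim_equal_style_admonitions : Prop := ∀ (html_content : String), Dom_style_admonitions html_content → Spec_style_admonitions html_content (style_admonitions html_content)

-- ===== LEMMAS AND PROOFS =====

-- Pattern / replacement tables indexed by rule number (proof-side mirror of pvRules)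
def pvPatF : Nat → List Char
  | 0 => ['<', 'd', 'i', 'v', ' ', 'c', 'l', 'a', 's', 's', '=', '"', 'a', 'd', 'm', 'o', 'n', 'i', 't', 'i', 'o', 'n', ' ', 'n', 'o', 't', 'e', '"', '>']
  | 1 => ['<', 'd', 'i', 'v', ' ', 'c', 'l', 'a', 's', 's', '=', '"', 'a', 'd', 'm', 'o', 'n', 'i', 't', 'i', 'o', 'n', ' ', 'w', 'a', 'r', 'n', 'i', 'n', 'g', '"', '>']
  | 2 => ['<', 'd', 'i', 'v', ' ', 'c', 'l', 'a', 's', 's', '=', '"', 'a', 'd', 'm', 'o', 'n', 'i', 't', 'i', 'o', 'n', ' ', 'i', 'm', 'p', 'o', 'r', 't', 'a', 'n', 't', '"', '>']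
  | 3 => ['<', 'd', 'i', 'v', ' ', 'c', 'l', 'a', 's', 's', '=', '"', 'a', 'd', 'm', 'o', 'n', 'i', 't', 'i', 'o', 'n', ' ', 't', 'i', 'p', '"', '>']
  | 4 => ['<', 'd', 'i', 'v', ' ', 'c', 'l', 'a', 's', 's', '=', '"', 'a', 'd', 'm', 'o', 'n', 'i', 't', 'i', 'o', 'n', ' ', 'd', 'a', 'n', 'g', 'e', 'r', '"', '>']
  | 5 => ['<', 'd', 'i', 'v', ' ', 'c', 'l', 'a', 's', 's', '=', '"', 'a', 'd', 'm', 'o', 'n', 'i', 't', 'i', 'o', 'n', ' ', 'i', 'n', 'f', 'o', '"', '>']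
  | 6 => ['<', 'p', ' ', 'c', 'l', 'a', 's', 's', '=', '"', 'a', 'd', 'm', 'o', 'n', 'i', 't', 'i', 'o', 'n', '-', 't', 'i', 't', 'l', 'e', '"', '>']
  | _ => ['!']

def pvRepF : Nat → List Char
  | 0 => ['<', 'd', 'i', 'v', ' ', 'c', 'l', 'a', 's', 's', '=', '"', 'a', 'd', 'm', 'o', 'n', 'i', 't', 'i', 'o', 'n', ' ', 'n', 'o', 't', 'e', '"', ' ', 's', 't', 'y', 'l', 'e', '=', '"', 'p', 'a', 'd', 'd', 'i', 'n', 'g', ':', ' ', '1', '5', 'p', 'x', ' ', '2', '0', 'p', 'x', ';', ' ', 'm', 'a', 'r', 'g', 'i', 'n', ':', ' ', '1', '.', '5', 'e', 'm', ' ', '0', ';', ' ', 'b', 'o', 'r', 'd', 'e', 'r', '-', 'r', 'a', 'd', 'i', 'u', 's', ':', ' ', '4', 'p', 'x', ';', ' ', 'b', 'a', 'c', 'k', 'g', 'r', 'o', 'u', 'n', 'd', '-', 'c', 'o', 'l', 'o', 'r', ':', ' ', '#', 'e', '7', 'f', '2', 'f', 'a', ';', ' ', 'b', 'o', 'r', 'd',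 'e', 'r', '-', 'l', 'e', 'f', 't', ':', ' ', '4', 'p', 'x', ' ', 's', 'o', 'l', 'i', 'd', ' ', '#', '2', '1', '9', '6', 'F', '3', ';', ' ', 'c', 'o', 'l', 'o', 'r', ':', ' ', '#', '0', '1', '4', '3', '6', '1', ';', '"', '>']
  | 1 => ['<', 'd', 'i', 'v', ' ', 'c', 'l', 'a', 's', 's', '=', '"', 'a', 'd', 'm', 'o', 'n', 'i', 't', 'i', 'o', 'n', ' ', 'w', 'a', 'r', 'n', 'i', 'n', 'g', '"', ' ', 's', 't', 'y', 'l', 'e', '=', '"', 'p', 'a', 'd', 'd', 'i', 'n', 'g', ':', ' ', '1', '5', 'p', 'x', ' ', '2', '0', 'p', 'x', ';', ' ', 'm', 'a', 'r', 'g', 'i', 'n', ':', ' ', '1', '.', '5', 'e', 'm', ' ', '0', ';', ' ', 'b', 'o', 'r', 'd', 'e', 'r', '-', 'r', 'a', 'd', 'i', 'u', 's', ':', ' ', '4', 'p', 'x', ';', ' ', 'b', 'a', 'c', 'k', 'g', 'r', 'o', 'u', 'n', 'd', '-', 'c', 'o', 'l', 'o', 'r', ':', ' ', '#', 'f', 'f',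 'f', '4', 'e', '5', ';', ' ', 'b', 'o', 'r', 'd', 'e', 'r', '-', 'l', 'e', 'f', 't', ':', ' ', '4', 'p', 'x', ' ', 's', 'o', 'l', 'i', 'd', ' ', '#', 'f', 'f', '9', '8', '0', '0', ';', ' ', 'c', 'o', 'l', 'o', 'r', ':', ' ', '#', '6', '6', '3', 'c', '0', '0', ';', '"', '>']
  | 2 => ['<', 'd', 'i', 'v', ' ', 'c', 'l', 'a', 's', 's', '=', '"', 'a', 'd', 'm', 'o', 'n', 'i', 't', 'i', 'o', 'n', ' ', 'i', 'm', 'p', 'o', 'r', 't', 'a', 'n', 't', '"', ' ', 's', 't', 'y', 'l', 'e', '=', '"', 'p', 'a', 'd', 'd', 'i', 'n', 'g', ':', ' ', '1', '5', 'p', 'x', ' ', '2', '0', 'p', 'x', ';', ' ', 'm', 'a', 'r', 'g', 'i', 'n', ':', ' ', '1', '.', '5', 'e', 'm', ' ', '0', ';', ' ', 'b', 'o', 'r', 'd', 'e', 'r', '-', 'r', 'a', 'd', 'i', 'u', 's', ':', ' ', '4', 'p', 'x', ';', ' ', 'b', 'a', 'c', 'k', 'g', 'r', 'o', 'u', 'n',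 'd', '-', 'c', 'o', 'l', 'o', 'r', ':', ' ', '#', 'f', 'f', 'e', '5', 'e', '5', ';', ' ', 'b', 'o', 'r', 'd', 'e', 'r', '-', 'l', 'e', 'f', 't', ':', ' ', '4', 'p', 'x', ' ', 's', 'o', 'l', 'i', 'd', ' ', '#', 'f', '4', '4', '3', '3', '6', ';', ' ', 'c', 'o', 'l', 'o', 'r', ':', ' ', '#', '5', 'f', '2', '1', '2', '0', ';', '"', '>']
  | 3 => ['<', 'd', 'i', 'v', ' ', 'c', 'l', 'a', 's', 's', '=', '"', 'a', 'd', 'm', 'o', 'n', 'i', 't', 'i', 'o', 'n', ' ', 't', 'i', 'p', '"', ' ', 's', 't', 'y', 'l', 'e', '=', '"', 'p', 'a', 'd', 'd', 'i', 'n', 'g', ':', ' ', '1', '5', 'p', 'x', ' ', '2', '0', 'p', 'x', ';', ' ', 'm', 'a', 'r', 'g', 'i', 'n', ':', ' ', '1', '.', '5', 'e', 'm', ' ', '0', ';', ' ', 'b', 'o', 'r', 'd', 'e', 'r', '-', 'r', 'a', 'd', 'i', 'u', 's', ':', ' ', '4', 'p', 'x', ';', ' ', 'b', 'a', 'c', 'k',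 'g', 'r', 'o', 'u', 'n', 'd', '-', 'c', 'o', 'l', 'o', 'r', ':', ' ', '#', 'e', '8', 'f', '5', 'e', '9', ';', ' ', 'b', 'o', 'r', 'd', 'e', 'r', '-', 'l', 'e', 'f', 't', ':', ' ', '4', 'p', 'x', ' ', 's', 'o', 'l', 'i', 'd', ' ', '#', '4', 'c', 'a', 'f', '5', '0', ';', ' ', 'c', 'o', 'l', 'o', 'r', ':', ' ', '#', '1', 'b', '5', 'e', '2', '0', ';', '"', '>']
  | 4 => ['<', 'd', 'i', 'v', ' ', 'c', 'l', 'a', 's', 's', '=', '"', 'a', 'd', 'm', 'o', 'n', 'i', 't', 'i', 'o', 'n', ' ', 'd', 'a', 'n', 'g', 'e', 'r', '"', ' ', 's', 't', 'y', 'l', 'e', '=', '"', 'p', 'a', 'd', 'd', 'i', 'n', 'g', ':', ' ', '1', '5', 'p', 'x', ' ', '2', '0', 'p', 'x', ';', ' ', 'm', 'a', 'r', 'g', 'i', 'n', ':', ' ', '1', '.', '5', 'e', 'm', ' ', '0', ';', ' ', 'b', 'o', 'r', 'd', 'e', 'r', '-', 'r', 'a', 'd', 'i', 'u', 's', ':',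 ' ', '4', 'p', 'x', ';', ' ', 'b', 'a', 'c', 'k', 'g', 'r', 'o', 'u', 'n', 'd', '-', 'c', 'o', 'l', 'o', 'r', ':', ' ', '#', 'f', 'f', 'e', 'b', 'e', 'e', ';', ' ', 'b', 'o', 'r', 'd', 'e', 'r', '-', 'l', 'e', 'f', 't', ':', ' ', '4', 'p', 'x', ' ', 's', 'o', 'l', 'i', 'd', ' ', '#', 'f', '4', '4', '3', '3', '6', ';', ' ', 'c', 'o', 'l', 'o', 'r', ':', ' ', '#', '5', 'f', '2', '1', '2', '0', ';', '"', '>']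
  | 5 => ['<', 'd', 'i', 'v', ' ', 'c', 'l', 'a', 's', 's', '=', '"', 'a', 'd', 'm', 'o', 'n', 'i', 't', 'i', 'o', 'n', ' ', 'i', 'n', 'f', 'o', '"', ' ', 's', 't', 'y', 'l', 'e', '=', '"', 'p', 'a', 'd', 'd', 'i', 'n', 'g', ':', ' ', '1', '5', 'p', 'x', ' ', '2', '0', 'p', 'x', ';', ' ', 'm', 'a', 'r', 'g', 'i', 'n', ':', ' ', '1', '.', '5', 'e', 'm', ' ', '0', ';', ' ', 'b', 'o', 'r', 'd', 'e', 'r', '-', 'r', 'a', 'd', 'i', 'u', 's', ':', ' ', '4', 'p', 'x', ';', ' ', 'b', 'a', 'c', 'k', 'g', 'r', 'o', 'u', 'n', 'd', '-', 'c', 'o', 'l', 'o', 'r', ':', ' ', '#', 'e', '1', 'f', '5', 'f', 'e', ';', ' ', 'b', 'o', 'r', 'd', 'e', 'r', '-', 'l', 'e', 'f', 't', ':', ' ', '4', 'p', 'x', ' ', 's', 'o', 'l', 'i', 'd', ' ', '#', '0', '3', 'a', '9', 'f', '4', ';', ' ', 'c', 'o', 'l', 'o', 'r', ':', ' ', '#',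 '0', '1', '5', '7', '9', 'b', ';', '"', '>']
  | 6 => ['<', 'p', ' ', 'c', 'l', 'a', 's', 's', '=', '"', 'a', 'd', 'm', 'o', 'n', 'i', 't', 'i', 'o', 'n', '-', 't', 'i', 't', 'l', 'e', '"', ' ', 's', 't', 'y', 'l', 'e', '=', '"', 'f', 'o', 'n', 't', '-', 'w', 'e', 'i', 'g', 'h', 't', ':', ' ', '6', '0', '0', ';', ' ', 'm', 'a', 'r', 'g', 'i', 'n', ':', ' ', '0', ' ', '0', ' ', '1', '0', 'p', 'x', ' ', '0', ';', ' ', 'f', 'o', 'n', 't', '-', 's', 'i', 'z', 'e', ':', ' ', '1', '.', '1', 'e', 'm', ';', '"', '>']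
  | _ => ['!']

-- Token model: the input split into literal characters and rule occurrences
inductive PvTok : Type
  | ch : Char → PvTok
  | rule : Nat → PvTok
deriving DecidableEq

def pvRender (m : Nat → List Char) (ts : List PvTok) : List Char :=
  ts.flatMap (fun t => match t with | PvTok.ch c => [c] | PvTok.rule k => m k)

-- admissible map: every rule renders as its pattern or its replacement
def pvAdm (m : Nat → List Char) : Prop := ∀ k, k < 7 → m k = pvPatF k ∨ m k = pvRepF k

def pvUpd (m : Nat → List Char) (k : Nat) : Nat → List Char :=
  fun j => if j = k then pvRepF j else m j

-- valid token list: no pattern starts at a literal-character position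
inductive PvValid : List PvTok → Prop
  | nil : PvValid []
  | ch (c : Char) (ts : List PvTok)
      (h : ∀ k, k < 7 → ¬ pvPatF k <+: c :: pvRender pvPatF ts)
      (hts : PvValid ts) : PvValid (PvTok.ch c :: ts)
  | rule (k : Nat) (ts : List PvTok) (hk : k < 7) (hts : PvValid ts) :
      PvValid (PvTok.rule k :: ts)

theorem pvRender_nil (m : Nat → List Char) : pvRender m [] = [] := rfl
theorem pvRender_ch (m : Nat → List Char) (c : Char) (ts : List PvTok) :
    pvRender m (PvTok.ch c :: ts) = c :: pvRender m ts := rfl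
theorem pvRender_rule (m : Nat → List Char) (k : Nat) (ts : List PvTok) :
    pvRender m (PvTok.rule k :: ts) = m k ++ pvRender m ts := rfl

-- unfolding equations for the loop of PySem.Chars.replace
theorem pv_go_zero (old new l acc : List Char) :
    PySem.Chars.replace.go old new 0 l acc = acc.reverse ++ l := by
  rw [PySem.Chars.replace.go.eq_def]

theorem pv_go_succ_nil (old new : List Char) (f : Nat) (acc : List Char) :
    PySem.Chars.replace.go old new (f + 1) [] acc = acc.reverse := by
  rw [PySem.Chars.replace.go.eq_def]

theorem pv_go_succ_cons (old new : List Char) (f : Nat) (c : Char) (t acc : List Char) :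
    PySem.Chars.replace.go old new (f + 1) (c :: t) acc =
      if old.isPrefixOf (c :: t) then
        PySem.Chars.replace.go old new f ((c :: t).drop old.length) (new.reverse ++ acc)
      else PySem.Chars.replace.go old new f t (c :: acc) := by
  rw [PySem.Chars.replace.go.eq_def]

-- generic: p cannot be a prefix of q ++ r when p and q are prefix-incomparable
theorem pv_not_prefix_append (p q r : List Char) (h1 : ¬ p <+: q) (h2 : ¬ q <+: p) :
    ¬ p <+: q ++ r := by
  rintro ⟨t, ht⟩
  rcases List.append_eq_append_iff.mp ht with ⟨a, ha, -⟩ | ⟨b, hb, -⟩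
  · exact h1 ⟨a, ha.symm⟩
  · exact h2 ⟨b, hb.symm⟩

-- shape facts (checked by kernel computation on the literal tables)
theorem pv_shape : ∀ k, k < 7 →
    (pvPatF k).head? = some '<' ∧ ((pvPatF k).drop 1).all (fun c => c != '<') = true ∧
    (pvRepF k).head? = some '<' ∧ ((pvRepF k).drop 1).all (fun c => c != '<') = true := by decide

-- separation facts: distinct rules' patterns/replacements are prefix-incomparable,
-- and each pattern is prefix-incomparable with its own replacement
theorem pv_sepB : ∀ j, j < 7 → ∀ k, k < 7 →
    (j ≠ k → ((pvPatF k).isPrefixOf (pvPatF j) = false ∧ (pvPatF j).isPrefixOf (pvPatF k) = false ∧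
      (pvPatF k).isPrefixOf (pvRepF j) = false ∧ (pvRepF j).isPrefixOf (pvPatF k) = false)) ∧
    ((pvPatF j).isPrefixOf (pvRepF j) = false ∧ (pvRepF j).isPrefixOf (pvPatF j) = false) := by
  decide

theorem pv_of_isPrefixOf_false {p q : List Char} (h : p.isPrefixOf q = false) : ¬ p <+: q := by
  intro hpre
  rw [List.isPrefixOf_iff_prefix.mpr hpre] at h
  simp at h

theorem pv_sep : ∀ j, j < 7 → ∀ k, k < 7 →
    (j ≠ k → ¬ pvPatF k <+: pvPatF j ∧ ¬ pvPatF j <+: pvPatF k ∧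
      ¬ pvPatF k <+: pvRepF j ∧ ¬ pvRepF j <+: pvPatF k) ∧
    (¬ pvPatF j <+: pvRepF j ∧ ¬ pvRepF j <+: pvPatF j) := by
  intro j hj k hk
  rcases pv_sepB j hj k hk with ⟨h1, h2⟩
  refine ⟨fun hne => ?_, pv_of_isPrefixOf_false h2.1, pv_of_isPrefixOf_false h2.2⟩
  rcases h1 hne with ⟨a, b, c, d⟩
  exact ⟨pv_of_isPrefixOf_false a, pv_of_isPrefixOf_false b,
    pv_of_isPrefixOf_false c, pv_of_isPrefixOf_false d⟩

theorem pv_pat_cons (k : Nat) (hk : k < 7) :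
    ∃ t, pvPatF k = '<' :: t ∧ ∀ c ∈ t, c ≠ '<' := by
  obtain ⟨h1, h2, -, -⟩ := pv_shape k hk
  cases hpat : pvPatF k with
  | nil => rw [hpat] at h1; simp at h1
  | cons a t =>
    rw [hpat] at h1 h2
    simp only [List.head?_cons, Option.some.injEq] at h1
    refine ⟨t, by rw [h1], fun c hc => ?_⟩
    have h2' : t.all (fun c => c != '<') = true := by simpa using h2
    have := List.all_eq_true.mp h2' c hc
    simpa using this

theorem pv_rep_cons (k : Nat) (hk : k < 7) :
    ∃ t, pvRepF k = '<' :: t ∧ ∀ c ∈ t, c ≠ '<' := by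
  obtain ⟨-, -, h1, h2⟩ := pv_shape k hk
  cases hpat : pvRepF k with
  | nil => rw [hpat] at h1; simp at h1
  | cons a t =>
    rw [hpat] at h1 h2
    simp only [List.head?_cons, Option.some.injEq] at h1
    refine ⟨t, by rw [h1], fun c hc => ?_⟩
    have h2' : t.all (fun c => c != '<') = true := by simpa using h2
    have := List.all_eq_true.mp h2' c hc
    simpa using this

theorem pv_m_cons (m : Nat → List Char) (hm : pvAdm m) (k : Nat) (hk : k < 7) :
    ∃ t, m k = '<' :: t ∧ ∀ c ∈ t, c ≠ '<' := by
  rcases hm k hk with h | h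
  · rw [h]; exact pv_pat_cons k hk
  · rw [h]; exact pv_rep_cons k hk

-- a '<'-free string is a prefix of the current render iff it is one of the original render
theorem pv_noLt (m : Nat → List Char) (hm : pvAdm m) :
    ∀ ts : List PvTok, PvValid ts → ∀ q : List Char, (∀ c ∈ q, c ≠ '<') →
      (q <+: pvRender m ts ↔ q <+: pvRender pvPatF ts) := by
  intro ts hv
  induction hv with
  | nil => intro q hq; rfl
  | ch c ts h hts ih =>
    intro q hq
    cases q with
    | nil => simp
    | cons a q' =>
      rw [pvRender_ch, pvRender_ch, List.cons_prefix_cons, List.cons_prefix_cons,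
        ih q' (fun c hc => hq c (List.mem_cons_of_mem _ hc))]
  | rule k ts hk hts ih =>
    intro q hq
    cases q with
    | nil => simp
    | cons a q' =>
      obtain ⟨t, hmk, -⟩ := pv_m_cons m hm k hk
      obtain ⟨t', hpk, -⟩ := pv_pat_cons k hk
      have ha : a ≠ '<' := hq a List.mem_cons_self
      rw [pvRender_rule, pvRender_rule, hmk, hpk]
      simp only [List.cons_append, List.cons_prefix_cons]
      constructor
      · rintro ⟨h1, -⟩; exact absurd h1 ha
      · rintro ⟨h1, -⟩; exact absurd h1 ha

-- a pattern occurs at the head of the render iff the head token is that rule, still unreplaced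
theorem pv_patIff (m : Nat → List Char) (hm : pvAdm m)
    (ts : List PvTok) (hv : PvValid ts) (k : Nat) (hk : k < 7) :
    pvPatF k <+: pvRender m ts ↔ (m k = pvPatF k ∧ ∃ ts', ts = PvTok.rule k :: ts') := by
  obtain ⟨t, hpk, htlt⟩ := pv_pat_cons k hk
  cases hv with
  | nil =>
    constructor
    · intro hpre
      rw [pvRender_nil, List.prefix_nil, hpk] at hpre
      exact absurd hpre (by simp)
    · rintro ⟨-, ts', h⟩; exact absurd h (by simp)
  | ch c ts' h hts =>
    constructor
    · intro hpre
      exfalso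
      rw [pvRender_ch, hpk, List.cons_prefix_cons] at hpre
      obtain ⟨hc, hpre'⟩ := hpre
      rw [pv_noLt m hm ts' hts t htlt] at hpre'
      exact h k hk (by rw [hpk, ← hc]; exact List.cons_prefix_cons.mpr ⟨rfl, hpre'⟩)
    · rintro ⟨-, ts'', h⟩; exact absurd h (by simp)
  | rule j ts' hj hts =>
    rw [pvRender_rule]
    by_cases hjk : j = k
    · subst hjk
      rcases hm j hj with hmj | hmj
      · constructor
        · intro _; exact ⟨hmj, ts', rfl⟩
        · intro _; rw [hmj]; exact List.prefix_append _ _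
      · have hsep := (pv_sep j hj j hj).2
        constructor
        · intro hpre
          rw [hmj] at hpre
          exact absurd hpre (pv_not_prefix_append _ _ _ hsep.1 hsep.2)
        · rintro ⟨hc, -⟩
          have heq : pvPatF j = pvRepF j := by rw [← hc, hmj]
          exact absurd (heq ▸ List.prefix_refl (pvPatF j)) hsep.1
    · have hsep := (pv_sep j hj k hk).1 (fun h => hjk h)
      constructor
      · intro hpre
        exfalso
        rcases hm j hj with hmj | hmj <;> rw [hmj] at hpre
        · exact pv_not_prefix_append _ _ _ hsep.1 hsep.2.1 hpre
        · exact pv_not_prefix_append _ _ _ hsep.2.2.1 hsep.2.2.2 hpre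
      · rintro ⟨-, ts'', heq⟩
        simp only [List.cons.injEq, PvTok.rule.injEq] at heq
        exact absurd heq.1 hjk

theorem pvAdm_patF : pvAdm pvPatF := fun _ _ => Or.inl rfl

theorem pvAdm_upd (m : Nat → List Char) (hm : pvAdm m) (k : Nat) : pvAdm (pvUpd m k) := by
  intro j hj
  unfold pvUpd
  split
  · exact Or.inr rfl
  · exact hm j hj

-- one replace pass over the render, as performed by Chars.replace.go
theorem pv_pass (k : Nat) (hk : k < 7) (m : Nat → List Char) (hm : pvAdm m) :
    ∀ ts : List PvTok, PvValid ts → ∀ fuel acc, (pvRender m ts).length ≤ fuel →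
      PySem.Chars.replace.go (pvPatF k) (pvRepF k) fuel (pvRender m ts) acc
        = acc.reverse ++ pvRender (pvUpd m k) ts := by
  intro ts hv
  induction hv with
  | nil =>
    intro fuel acc hf
    cases fuel with
    | zero => rw [pvRender_nil, pv_go_zero, pvRender_nil]
    | succ f => rw [pvRender_nil, pv_go_succ_nil, pvRender_nil, List.append_nil]
  | ch c ts h hts ih =>
    intro fuel acc hf
    rw [pvRender_ch] at hf ⊢
    cases fuel with
    | zero => simp at hf
    | succ f =>
      have hnpre : ¬ pvPatF k <+: c :: pvRender m ts := by
        rw [← pvRender_ch m c ts, pv_patIff m hm _ (PvValid.ch c ts h hts) k hk]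
        rintro ⟨-, ts', heq⟩
        simp at heq
      rw [pv_go_succ_cons, if_neg (fun hb => hnpre (List.isPrefixOf_iff_prefix.mp hb))]
      rw [ih f (c :: acc) (by simpa using hf)]
      rw [pvRender_ch]
      simp [List.append_assoc]
  | rule j ts hj hts ih =>
    intro fuel acc hf
    rw [pvRender_rule] at hf ⊢
    by_cases hmatch : j = k ∧ m j = pvPatF k
    · obtain ⟨rfl, hmj⟩ := hmatch
      obtain ⟨t, hpk, -⟩ := pv_pat_cons j hj
      rw [hmj] at hf ⊢
      cases fuel with
      | zero => rw [hpk] at hf; simp at hf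
      | succ f =>
        have hlist : pvPatF j ++ pvRender m ts = '<' :: (t ++ pvRender m ts) := by
          rw [hpk, List.cons_append]
        have hc : (pvPatF j).isPrefixOf ('<' :: (t ++ pvRender m ts)) = true := by
          rw [← hlist]
          exact List.isPrefixOf_iff_prefix.mpr (List.prefix_append _ _)
        rw [hlist, pv_go_succ_cons, if_pos hc, ← hlist, List.drop_left]
        rw [ih f ((pvRepF j).reverse ++ acc) (by rw [hpk] at hf; simp at hf; omega)]
        rw [pvRender_rule]
        have hu : pvUpd m j j = pvRepF j := by unfold pvUpd; simp
        rw [hu]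
        simp [List.append_assoc]
    · have hnpre : ¬ pvPatF k <+: m j ++ pvRender m ts := by
        rw [← pvRender_rule, pv_patIff m hm _ (PvValid.rule j ts hj hts) k hk]
        rintro ⟨hmk, ts', heq⟩
        simp only [List.cons.injEq, PvTok.rule.injEq] at heq
        exact hmatch ⟨heq.1, by rw [heq.1]; exact hmk⟩
      obtain ⟨t, hmj, htlt⟩ := pv_m_cons m hm j hj
      have hu : pvUpd m k j = m j := by
        unfold pvUpd
        split
        · next hjk =>
          subst hjk
          rcases hm j hj with hmp | hmp
          · exact absurd ⟨rfl, hmp⟩ hmatch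
          · exact hmp.symm
        · rfl
      rw [hmj] at hf ⊢
      cases fuel with
      | zero => simp at hf
      | succ f =>
        have inner : ∀ q : List Char, (∀ c ∈ q, c ≠ '<') → ∀ fl ac,
            (q ++ pvRender m ts).length ≤ fl →
            PySem.Chars.replace.go (pvPatF k) (pvRepF k) fl (q ++ pvRender m ts) ac
              = ac.reverse ++ q ++ pvRender (pvUpd m k) ts := by
          intro q hq
          induction q with
          | nil =>
            intro fl ac hfl
            simpa using ih fl ac (by simpa using hfl)
          | cons a q' ihq =>
            intro fl ac hfl
            cases fl with
            | zero => simp at hfl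
            | succ f2 =>
              have ha : a ≠ '<' := hq a List.mem_cons_self
              obtain ⟨tp, hpk2, -⟩ := pv_pat_cons k hk
              have hnp2 : ¬ (pvPatF k).isPrefixOf (a :: (q' ++ pvRender m ts)) = true := by
                rw [List.isPrefixOf_iff_prefix, hpk2, List.cons_prefix_cons]
                rintro ⟨h1, -⟩
                exact ha h1.symm
              rw [List.cons_append, pv_go_succ_cons, if_neg hnp2]
              rw [ihq (fun c hc => hq c (List.mem_cons_of_mem _ hc)) f2 (a :: ac)
                (by simpa using Nat.le_of_succ_le_succ hfl)]
              simp [List.append_assoc]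
        have hnb : ¬ (pvPatF k).isPrefixOf ('<' :: (t ++ pvRender m ts)) = true := by
          intro hb
          apply hnpre
          rw [hmj, List.cons_append]
          exact List.isPrefixOf_iff_prefix.mp hb
        rw [List.cons_append, pv_go_succ_cons, if_neg hnb]
        rw [inner t htlt f ('<' :: acc) (by simpa using Nat.le_of_succ_le_succ hf)]
        rw [pvRender_rule, hu, hmj]
        simp [List.append_assoc]

theorem pv_replace (k : Nat) (hk : k < 7) (m : Nat → List Char) (hm : pvAdm m)
    (ts : List PvTok) (hv : PvValid ts) :
    PySem.Chars.replace (pvRender m ts) (pvPatF k) (pvRepF k) = pvRender (pvUpd m k) ts := by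
  obtain ⟨t, hpk, -⟩ := pv_pat_cons k hk
  unfold PySem.Chars.replace
  rw [if_neg (by rw [hpk]; simp)]
  simpa using pv_pass k hk m hm ts hv (pvRender m ts).length [] le_rfl

-- ===== B side: the scanner over a valid render yields the fully replaced render =====

theorem pv_rules_eq : pvRules =
    [(pvPatF 0, pvRepF 0), (pvPatF 1, pvRepF 1), (pvPatF 2, pvRepF 2), (pvPatF 3, pvRepF 3),
     (pvPatF 4, pvRepF 4), (pvPatF 5, pvRepF 5), (pvPatF 6, pvRepF 6)] := rfl

theorem pv_match_none (l : List Char) (h : ∀ k, k < 7 → ¬ pvPatF k <+: l) :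
    pvMatch pvRules l = none := by
  have hb : ∀ k, k < 7 → (pvPatF k).isPrefixOf l = false := by
    intro k hk
    cases hb' : (pvPatF k).isPrefixOf l
    · rfl
    · exact absurd (List.isPrefixOf_iff_prefix.mp hb') (h k hk)
  rw [pv_rules_eq]
  simp [pvMatch, hb 0 (by omega), hb 1 (by omega), hb 2 (by omega), hb 3 (by omega),
    hb 4 (by omega), hb 5 (by omega), hb 6 (by omega)]

theorem pv_match_at (k : Nat) (hk : k < 7) (l : List Char) (hpre : pvPatF k <+: l)
    (hprev : ∀ j, j < 7 → j ≠ k → ¬ pvPatF j <+: l) :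
    pvMatch pvRules l = some ((pvPatF k).length, pvRepF k) := by
  have hb : ∀ j, j < 7 → j ≠ k → (pvPatF j).isPrefixOf l = false := by
    intro j hj hjk
    cases hb' : (pvPatF j).isPrefixOf l
    · rfl
    · exact absurd (List.isPrefixOf_iff_prefix.mp hb') (hprev j hj hjk)
  have hbk : (pvPatF k).isPrefixOf l = true := List.isPrefixOf_iff_prefix.mpr hpre
  interval_cases k
  · rw [pv_rules_eq]; simp [pvMatch, hbk]
  · rw [pv_rules_eq]; simp [pvMatch, hbk, hb 0 (by omega) (by omega)]
  · rw [pv_rules_eq]; simp [pvMatch, hbk, hb 0 (by omega) (by omega), hb 1 (by omega) (by omega)]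
  · rw [pv_rules_eq]; simp [pvMatch, hbk, hb 0 (by omega) (by omega), hb 1 (by omega) (by omega), hb 2 (by omega) (by omega)]
  · rw [pv_rules_eq]; simp [pvMatch, hbk, hb 0 (by omega) (by omega), hb 1 (by omega) (by omega), hb 2 (by omega) (by omega), hb 3 (by omega) (by omega)]
  · rw [pv_rules_eq]; simp [pvMatch, hbk, hb 0 (by omega) (by omega), hb 1 (by omega) (by omega), hb 2 (by omega) (by omega), hb 3 (by omega) (by omega), hb 4 (by omega) (by omega)]
  · rw [pv_rules_eq]; simp [pvMatch, hbk, hb 0 (by omega) (by omega), hb 1 (by omega) (by omega), hb 2 (by omega) (by omega), hb 3 (by omega) (by omega), hb 4 (by omega) (by omega), hb 5 (by omega) (by omega)]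

theorem pv_scan (ts : List PvTok) (hv : PvValid ts) :
    ∀ fuel, (pvRender pvPatF ts).length ≤ fuel →
      pvScanGo fuel (pvRender pvPatF ts) = pvRender pvRepF ts := by
  induction hv with
  | nil =>
    intro fuel hf
    cases fuel with
    | zero => rfl
    | succ f =>
      have hm0 : pvMatch pvRules [] = none := by
        apply pv_match_none
        intro k hk
        obtain ⟨t, hpk, -⟩ := pv_pat_cons k hk
        rw [hpk]
        simp
      simp only [pvRender_nil, pvScanGo, hm0]
  | ch c ts h hts ih =>
    intro fuel hf
    rw [pvRender_ch] at hf ⊢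
    cases fuel with
    | zero => simp at hf
    | succ f =>
      have hm0 : pvMatch pvRules (c :: pvRender pvPatF ts) = none := pv_match_none _ h
      simp only [pvScanGo, hm0]
      rw [ih f (by simpa using hf)]
      exact (pvRender_ch _ _ _).symm
  | rule k ts hk hts ih =>
    intro fuel hf
    rw [pvRender_rule] at hf ⊢
    obtain ⟨t, hpk, -⟩ := pv_pat_cons k hk
    have hprev : ∀ j, j < 7 → j ≠ k → ¬ pvPatF j <+: pvPatF k ++ pvRender pvPatF ts := by
      intro j hj hjk
      rw [← pvRender_rule pvPatF k ts,
        pv_patIff pvPatF pvAdm_patF _ (PvValid.rule k ts hk hts) j hj]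
      rintro ⟨-, ts', heq⟩
      simp only [List.cons.injEq, PvTok.rule.injEq] at heq
      exact hjk heq.1.symm
    cases fuel with
    | zero => rw [hpk] at hf; simp at hf
    | succ f =>
      have hm1 : pvMatch pvRules (pvPatF k ++ pvRender pvPatF ts)
          = some ((pvPatF k).length, pvRepF k) :=
        pv_match_at k hk _ (List.prefix_append _ _) hprev
      simp only [pvScanGo, hm1, List.drop_left]
      rw [ih f (by rw [hpk] at hf; simp at hf; omega)]
      exact (pvRender_rule _ _ _).symm

-- ===== parsing the input into a valid token list =====

def pvIdx (l : List Char) : Option Nat := (List.range 7).find? (fun k => (pvPatF k).isPrefixOf l)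

def pvParseGo : Nat → List Char → List PvTok
  | 0, _ => []
  | _ + 1, [] => []
  | f + 1, c :: t =>
    match pvIdx (c :: t) with
    | some k => PvTok.rule k :: pvParseGo f ((c :: t).drop (pvPatF k).length)
    | none => PvTok.ch c :: pvParseGo f t

theorem pvIdx_some (l : List Char) (k : Nat) (h : pvIdx l = some k) :
    k < 7 ∧ pvPatF k <+: l := by
  unfold pvIdx at h
  constructor
  · have := List.mem_of_find?_eq_some h
    simpa using this
  · have hp := List.find?_some h
    exact List.isPrefixOf_iff_prefix.mp hp

theorem pvIdx_none (l : List Char) (h : pvIdx l = none) :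
    ∀ k, k < 7 → ¬ pvPatF k <+: l := by
  unfold pvIdx at h
  intro k hk hpre
  have := List.find?_eq_none.mp h k (by simpa using hk)
  exact this (List.isPrefixOf_iff_prefix.mpr hpre)

theorem pv_render_parse : ∀ fuel (l : List Char), l.length ≤ fuel →
    pvRender pvPatF (pvParseGo fuel l) = l := by
  intro fuel
  induction fuel with
  | zero =>
    intro l hl
    cases l with
    | nil => rfl
    | cons c t => simp at hl
  | succ f ih =>
    intro l hl
    cases l with
    | nil => rfl
    | cons c t =>
      rw [pvParseGo]
      cases hidx : pvIdx (c :: t) with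
      | some k =>
        obtain ⟨hk, hpre⟩ := pvIdx_some _ _ hidx
        obtain ⟨tp, hpk, -⟩ := pv_pat_cons k hk
        obtain ⟨s, hs⟩ := hpre
        simp only [pvRender_rule]
        rw [ih _ (by
          rw [List.length_drop]
          have h1 : 1 ≤ (pvPatF k).length := by rw [hpk]; simp
          have h2 : (c :: t).length ≤ f + 1 := hl
          simp at h2 ⊢
          omega)]
        rw [← hs, List.drop_left]
      | none =>
        simp only [pvRender_ch]
        rw [ih t (by simpa using hl)]

theorem pv_valid_parse : ∀ fuel (l : List Char), l.length ≤ fuel →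
    PvValid (pvParseGo fuel l) := by
  intro fuel
  induction fuel with
  | zero => intro l hl; exact PvValid.nil
  | succ f ih =>
    intro l hl
    cases l with
    | nil => exact PvValid.nil
    | cons c t =>
      rw [pvParseGo]
      cases hidx : pvIdx (c :: t) with
      | some k =>
        obtain ⟨hk, hpre⟩ := pvIdx_some _ _ hidx
        obtain ⟨tp, hpk, -⟩ := pv_pat_cons k hk
        refine PvValid.rule k _ hk (ih _ ?_)
        rw [List.length_drop]
        have h1 : 1 ≤ (pvPatF k).length := by rw [hpk]; simp
        have h2 : (c :: t).length ≤ f + 1 := hl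
        simp at h2 ⊢
        omega
      | none =>
        refine PvValid.ch c _ ?_ (ih t (by simpa using hl))
        intro k hk
        rw [pv_render_parse f t (by simpa using hl)]
        exact pvIdx_none _ hidx k hk

theorem pv_render_congr (ts : List PvTok) (hv : PvValid ts) (m m' : Nat → List Char)
    (h : ∀ k, k < 7 → m k = m' k) : pvRender m ts = pvRender m' ts := by
  induction hv with
  | nil => rfl
  | ch c ts _ _ ih => rw [pvRender_ch, pvRender_ch, ih]
  | rule k ts hk _ ih => rw [pvRender_rule, pvRender_rule, h k hk, ih]

-- ===== assembling A's twelve passes =====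

def pvChainA (l : List Char) : List Char :=
  PySem.Chars.replace (PySem.Chars.replace (PySem.Chars.replace (PySem.Chars.replace
    (PySem.Chars.replace (PySem.Chars.replace (PySem.Chars.replace (PySem.Chars.replace
    (PySem.Chars.replace (PySem.Chars.replace (PySem.Chars.replace (PySem.Chars.replace
      l (pvPatF 0) (pvRepF 0)) (pvPatF 6) (pvRepF 6))
        (pvPatF 1) (pvRepF 1)) (pvPatF 6) (pvRepF 6))
        (pvPatF 2) (pvRepF 2)) (pvPatF 6) (pvRepF 6))
        (pvPatF 3) (pvRepF 3)) (pvPatF 6) (pvRepF 6))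
        (pvPatF 4) (pvRepF 4)) (pvPatF 6) (pvRepF 6))
        (pvPatF 5) (pvRepF 5)) (pvPatF 6) (pvRepF 6)

def pvMFin : Nat → List Char :=
  pvUpd (pvUpd (pvUpd (pvUpd (pvUpd (pvUpd (pvUpd (pvUpd (pvUpd (pvUpd (pvUpd (pvUpd
    pvPatF 0) 6) 1) 6) 2) 6) 3) 6) 4) 6) 5) 6

theorem pvMFin_eq : ∀ k, k < 7 → pvMFin k = pvRepF k := by
  intro k hk
  interval_cases k <;> simp [pvMFin, pvUpd]

-- A's twelve string-literal arguments, as the indexed tables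
theorem pv_argP0 : ("<div class=\"admonition " ++ "note" ++ "\">").toList = pvPatF 0 := by
  simp [pvPatF]
theorem pv_argR0 : ("<div class=\"admonition " ++ "note" ++ "\" style=\"padding: 15px 20px; margin: 1.5em 0; border-radius: 4px; " ++ "background-color: #e7f2fa; border-left: 4px solid #2196F3; color: #014361;" ++ "\">").toList = pvRepF 0 := by
  simp [pvRepF]
theorem pv_argP1 : ("<div class=\"admonition " ++ "warning" ++ "\">").toList = pvPatF 1 := by
  simp [pvPatF]
theorem pv_argR1 : ("<div class=\"admonition " ++ "warning" ++ "\" style=\"padding: 15px 20px; margin: 1.5em 0; border-radius: 4px; " ++ "background-color: #fff4e5; border-left: 4px solid #ff9800; color: #663c00;" ++ "\">").toList = pvRepF 1 := by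
  simp [pvRepF]
theorem pv_argP2 : ("<div class=\"admonition " ++ "important" ++ "\">").toList = pvPatF 2 := by
  simp [pvPatF]
theorem pv_argR2 : ("<div class=\"admonition " ++ "important" ++ "\" style=\"padding: 15px 20px; margin: 1.5em 0; border-radius: 4px; " ++ "background-color: #ffe5e5; border-left: 4px solid #f44336; color: #5f2120;" ++ "\">").toList = pvRepF 2 := by
  simp [pvRepF]
theorem pv_argP3 : ("<div class=\"admonition " ++ "tip" ++ "\">").toList = pvPatF 3 := by
  simp [pvPatF]
theorem pv_argR3 : ("<div class=\"admonition " ++ "tip" ++ "\" style=\"padding: 15px 20px; margin: 1.5em 0; border-radius: 4px; " ++ "background-color: #e8f5e9; border-left: 4px solid #4caf50; color: #1b5e20;" ++ "\">").toList = pvRepF 3 := by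
  simp [pvRepF]
theorem pv_argP4 : ("<div class=\"admonition " ++ "danger" ++ "\">").toList = pvPatF 4 := by
  simp [pvPatF]
theorem pv_argR4 : ("<div class=\"admonition " ++ "danger" ++ "\" style=\"padding: 15px 20px; margin: 1.5em 0; border-radius: 4px; " ++ "background-color: #ffebee; border-left: 4px solid #f44336; color: #5f2120;" ++ "\">").toList = pvRepF 4 := by
  simp [pvRepF]
theorem pv_argP5 : ("<div class=\"admonition " ++ "info" ++ "\">").toList = pvPatF 5 := by
  simp [pvPatF]
theorem pv_argR5 : ("<div class=\"admonition " ++ "info" ++ "\" style=\"padding: 15px 20px; margin: 1.5em 0; border-radius: 4px; " ++ "background-color: #e1f5fe; border-left: 4px solid #03a9f4; color: #01579b;" ++ "\">").toList = pvRepF 5 := by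
  simp [pvRepF]
theorem pv_argP6 : ("<p class=\"admonition-title\">" : String).toList = pvPatF 6 := by
  simp [pvPatF]
theorem pv_argR6 : ("<p class=\"admonition-title\" style=\"font-weight: 600; margin: 0 0 10px 0; font-size: 1.1em;\">" : String).toList = pvRepF 6 := by
  simp [pvRepF]

theorem pv_A_eq (html : String) : style_admonitions html = String.ofList (pvChainA html.toList) := by
  unfold style_admonitions pvAdmonitionStyles pvChainA
  simp only [List.foldl_cons, List.foldl_nil]
  simp only [PySem.Str.replace, String.toList_ofList]
  rw [pv_argP0, pv_argR0, pv_argP1, pv_argR1, pv_argP2, pv_argR2, pv_argP3, pv_argR3,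
    pv_argP4, pv_argR4, pv_argP5, pv_argR5, pv_argP6, pv_argR6]

theorem pv_main_list (l : List Char) : pvChainA l = pvScanGo l.length l := by
  have hv := pv_valid_parse l.length l le_rfl
  have hr := pv_render_parse l.length l le_rfl
  have a0 := pvAdm_patF
  have a1 := pvAdm_upd _ a0 0
  have a2 := pvAdm_upd _ a1 6
  have a3 := pvAdm_upd _ a2 1
  have a4 := pvAdm_upd _ a3 6
  have a5 := pvAdm_upd _ a4 2
  have a6 := pvAdm_upd _ a5 6
  have a7 := pvAdm_upd _ a6 3
  have a8 := pvAdm_upd _ a7 6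
  have a9 := pvAdm_upd _ a8 4
  have a10 := pvAdm_upd _ a9 6
  have a11 := pvAdm_upd _ a10 5
  have hchain : pvChainA (pvRender pvPatF (pvParseGo l.length l))
      = pvRender pvMFin (pvParseGo l.length l) := by
    unfold pvChainA pvMFin
    rw [pv_replace 0 (by omega) _ a0 _ hv, pv_replace 6 (by omega) _ a1 _ hv,
      pv_replace 1 (by omega) _ a2 _ hv, pv_replace 6 (by omega) _ a3 _ hv,
      pv_replace 2 (by omega) _ a4 _ hv, pv_replace 6 (by omega) _ a5 _ hv,
      pv_replace 3 (by omega) _ a6 _ hv, pv_replace 6 (by omega) _ a7 _ hv,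
      pv_replace 4 (by omega) _ a8 _ hv, pv_replace 6 (by omega) _ a9 _ hv,
      pv_replace 5 (by omega) _ a10 _ hv, pv_replace 6 (by omega) _ a11 _ hv]
  have hscan : pvScanGo (pvRender pvPatF (pvParseGo l.length l)).length
      (pvRender pvPatF (pvParseGo l.length l)) = pvRender pvRepF (pvParseGo l.length l) :=
    pv_scan _ hv _ le_rfl
  calc pvChainA l = pvChainA (pvRender pvPatF (pvParseGo l.length l)) := by rw [hr]
    _ = pvRender pvMFin (pvParseGo l.length l) := hchain
    _ = pvRender pvRepF (pvParseGo l.length l) := pv_render_congr _ hv _ _ pvMFin_eq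
    _ = pvScanGo l.length l := by rw [← hscan, hr]

-- ===== VERDICT (by name: the statement is the Claim_ definition above) =====
theorem style_admonitions_spec : Claim_equal_style_admonitions := by
  intro html _
  unfold Spec_style_admonitions style_admonitions_alt
  rw [pv_A_eq, pv_main_list]
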